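-- pv_equiv track=rewrite | github.com/karannaik3797/algorithdatastructure | String/suffix_array_matching.py | find_all_matches
-- ===== SOURCE A (Python) =====
-- import operator
--
-- def find_all_matches(suffix_arr, text, query):
--     def binary_search(lo, hi, op):
--         m = len(query)
--         while lo < hi:
--             mid = (lo + hi) // 2
--             suffix = suffix_arr[mid]
--             if op(text[suffix:suffix+m], query):
--                 lo = mid + 1
--             else:
--                 hi = mid
--
--         return lo
--
--     n = len(suffix_arr)
--     start = binary_search(0, n, operator.lt)
--     end = binary_search(start, n, operator.eq)
--
--     return suffix_arr[start:end]
-- ===== SOURCE B (Python) =====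
-- def find_all_matches(suffix_arr, text, query):
--     m = len(query)
--     prefixes = [text[s:s+m] for s in suffix_arr]
--
--     def locate(lo, hi, advance):
--         if lo >= hi:
--             return lo
--         mid = (lo + hi) // 2
--         if advance(prefixes[mid]):
--             return locate(mid + 1, hi, advance)
--         return locate(lo, mid, advance)
--
--     start = locate(0, len(prefixes), lambda p: p < query)
--     end = locate(start, len(prefixes), lambda p: p == query)
--     return suffix_arr[start:end]
-- ===== Notes on version B (the rewrite author's own statement) =====
-- stated objective: idiomatic
-- what changed: B materializes the length-m prefix at every suffix position once into a key table and finds both bounds with a single recursive locate helper over that table, instead of A's two hand-rolled while-loop binary searches that re-slice the text at every probe; the probe sequence is identical, so the results agree on all inputs (B trades A's O(m log n) slicing work for an O(n*m) table build).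
import Mathlib
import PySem

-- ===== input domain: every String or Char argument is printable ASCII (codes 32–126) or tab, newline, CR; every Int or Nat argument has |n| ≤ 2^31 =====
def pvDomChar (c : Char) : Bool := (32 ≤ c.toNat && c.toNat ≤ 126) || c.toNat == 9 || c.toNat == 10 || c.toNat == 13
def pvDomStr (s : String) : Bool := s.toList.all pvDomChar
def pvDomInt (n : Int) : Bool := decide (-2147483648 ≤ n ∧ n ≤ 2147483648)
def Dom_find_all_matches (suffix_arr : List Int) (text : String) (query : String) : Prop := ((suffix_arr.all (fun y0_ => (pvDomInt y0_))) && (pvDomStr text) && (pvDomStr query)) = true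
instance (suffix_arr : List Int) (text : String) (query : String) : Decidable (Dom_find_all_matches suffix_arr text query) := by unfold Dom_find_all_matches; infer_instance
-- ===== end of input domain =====

-- B replaces A's per-probe text slicing by a prefix table built once and A's two while
-- loops by one recursive locate helper over that table (objective: idiomatic/alternative).
-- ===== PORT A =====
-- A's inner 'binary_search(lo, hi, op)': while lo < hi, probe mid, slice text there.
def pvBinarySearchA (suffix_arr : List Int) (text : String) (query : String)
    (op : String → String → Bool) (lo hi : Nat) : Nat :=
  if h : lo < hi then
    let mid := (lo + hi) / 2
    let suffix := PySem.List.pyGetD suffix_arr (mid : Int) 0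
    if op (PySem.Str.slice text (some suffix) (some (suffix + PySem.Str.len query))) query then
      pvBinarySearchA suffix_arr text query op (mid + 1) hi
    else
      pvBinarySearchA suffix_arr text query op lo mid
  else lo
termination_by hi - lo
decreasing_by all_goals omega

def find_all_matches (suffix_arr : List Int) (text : String) (query : String) : List Int :=
  let n := suffix_arr.length
  let start := pvBinarySearchA suffix_arr text query (fun a b => decide (a < b)) 0 n
  let «end» := pvBinarySearchA suffix_arr text query (fun a b => decide (a = b)) start n
  PySem.List.slice suffix_arr (some (start : Int)) (some («end» : Int))

-- ===== PORT B =====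
-- B's recursive 'locate(lo, hi, advance)' over the precomputed prefix table.
def pvLocateB (prefixes : List String) (advance : String → Bool) (lo hi : Nat) : Nat :=
  if h : lo ≥ hi then lo
  else
    let mid := (lo + hi) / 2
    if advance (PySem.List.pyGetD prefixes (mid : Int) "") then
      pvLocateB prefixes advance (mid + 1) hi
    else
      pvLocateB prefixes advance lo mid
termination_by hi - lo
decreasing_by all_goals omega

def find_all_matches_alt (suffix_arr : List Int) (text : String) (query : String) : List Int :=
  let m := PySem.Str.len query
  let prefixes := suffix_arr.map (fun s => PySem.Str.slice text (some s) (some (s + m)))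
  let start := pvLocateB prefixes (fun p => decide (p < query)) 0 prefixes.length
  let «end» := pvLocateB prefixes (fun p => decide (p = query)) start prefixes.length
  PySem.List.slice suffix_arr (some (start : Int)) (some («end» : Int))

-- ===== PRECONDITION & SPEC =====
def Spec_find_all_matches (suffix_arr : List Int) (text : String) (query : String) (out : List Int) : Prop := out = find_all_matches_alt suffix_arr text query
instance (suffix_arr : List Int) (text : String) (query : String) (out : List Int) : Decidable (Spec_find_all_matches suffix_arr text query out) := by unfold Spec_find_all_matches; infer_instance

-- ===== CLAIM (what is proved, stated in full; the proofs are below) =====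
def Claim_equal_find_all_matches : Prop := ∀ (suffix_arr : List Int) (text : String) (query : String), Dom_find_all_matches suffix_arr text query → Spec_find_all_matches suffix_arr text query (find_all_matches suffix_arr text query)

-- ===== LEMMAS AND PROOFS =====

-- The two searches probe the same midpoints: the prefix-table element at mid is
-- exactly the slice A computes there.
theorem pvLocate_eq_binarySearch (suffix_arr : List Int) (text : String) (query : String)
    (op : String → String → Bool) (k lo hi : Nat) (hk : hi - lo ≤ k)
    (hhi : hi ≤ suffix_arr.length) :
    pvBinarySearchA suffix_arr text query op lo hi =
      pvLocateB (suffix_arr.map (fun s => PySem.Str.slice text (some s) (some (s + PySem.Str.len query))))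
        (fun p => op p query) lo hi := by
  induction k generalizing lo hi with
  | zero =>
    rw [pvBinarySearchA, pvLocateB]
    have : ¬ lo < hi := by omega
    simp [this, show lo ≥ hi by omega]
  | succ k ih =>
    rw [pvBinarySearchA, pvLocateB]
    by_cases h : lo < hi
    · have hmid : (lo + hi) / 2 < suffix_arr.length := by omega
      have hget : PySem.List.pyGetD
          (suffix_arr.map (fun s => PySem.Str.slice text (some s) (some (s + PySem.Str.len query))))
          (((lo + hi) / 2 : Nat) : Int) ""
          = PySem.Str.slice text (some (PySem.List.pyGetD suffix_arr (((lo + hi) / 2 : Nat) : Int) 0))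
              (some ((PySem.List.pyGetD suffix_arr (((lo + hi) / 2 : Nat) : Int) 0) + PySem.Str.len query)) := by
        rw [PySem.List.pyGetD_natCast, PySem.List.pyGetD_natCast]
        rw [List.getD_eq_getElem?_getD, List.getD_eq_getElem?_getD]
        rw [List.getElem?_map]
        have : suffix_arr[(lo + hi) / 2]? = some suffix_arr[(lo + hi) / 2] :=
          List.getElem?_eq_getElem hmid
        simp [this]
      simp only [h, dif_pos, show ¬ lo ≥ hi by omega, dif_neg, not_false_iff, hget]
      split
      · exact ih ((lo + hi) / 2 + 1) hi (by omega) hhi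
      · exact ih lo ((lo + hi) / 2) (by omega) (by omega)
    · simp [h, show lo ≥ hi by omega]

-- ===== VERDICT (by name: the statement is the Claim_ definition above) =====
theorem find_all_matches_spec : Claim_equal_find_all_matches := by
  intro suffix_arr text query _
  unfold Spec_find_all_matches find_all_matches find_all_matches_alt
  have h2 := pvLocate_eq_binarySearch suffix_arr text query (fun a b => decide (a = b))
      suffix_arr.length (pvBinarySearchA suffix_arr text query (fun a b => decide (a < b)) 0 suffix_arr.length)
      suffix_arr.length (by omega) (by omega)
  have h1 := pvLocate_eq_binarySearch suffix_arr text query (fun a b => decide (a < b))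
      suffix_arr.length 0 suffix_arr.length (by omega) (by omega)
  simp only [List.length_map]
  rw [h2, h1]
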